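-- pv_equiv track=rewrite | github.com/AnushkaMathur21/Library-Management-System | chart.py | count_branch
-- ===== SOURCE A (Python) =====
-- def count_branch(branch):
--     cse=ece=it=eee=me=ce=0
--     for b in branch:
--         if b=='CSE':
--             cse+=1
--         elif b=='ECE':
--             ece+=1
--         elif b=='IT':
--             it+=1
--         elif b=='EEE':
--             eee+=1
--         elif b=='ME':
--             me+=1
--         elif b=='CE':
--             ce+=1
--     branch_count=[cse,ece,it,eee,me,ce]
--     return(branch_count)
-- ===== SOURCE B (Python) =====
-- def count_branch(branch):
--     return [list(branch).count(k) for k in ('CSE', 'ECE', 'IT', 'EEE', 'ME', 'CE')]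
-- ===== Notes on version B (the rewrite author's own statement) =====
-- stated objective: simpler
-- what changed: Replaced the single accumulation loop with six counters and a six-way if-elif chain by six staged counting passes: one list.count scan per fixed category, assembled by a comprehension over the category tuple.
import Mathlib
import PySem

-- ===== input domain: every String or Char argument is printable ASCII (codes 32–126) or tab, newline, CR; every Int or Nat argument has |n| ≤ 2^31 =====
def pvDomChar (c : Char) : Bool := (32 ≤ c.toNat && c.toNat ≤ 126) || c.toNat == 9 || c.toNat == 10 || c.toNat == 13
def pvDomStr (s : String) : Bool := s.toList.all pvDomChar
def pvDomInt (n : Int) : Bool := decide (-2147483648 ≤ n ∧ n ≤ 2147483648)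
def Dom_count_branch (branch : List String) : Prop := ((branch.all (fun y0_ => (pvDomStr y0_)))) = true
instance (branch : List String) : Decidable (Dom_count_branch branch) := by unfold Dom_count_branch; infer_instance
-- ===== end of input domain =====

-- B replaces A's one-pass six-accumulator if-elif loop by six staged list.count passes, one per fixed category (simpler; same asymptotic cost).


-- ===== PORT A =====
-- Port of A: six accumulators updated per element by the if-elif chain, in source order.
def pvStepA (s : Int × Int × Int × Int × Int × Int) (b : String) : Int × Int × Int × Int × Int × Int :=
  let (cse, ece, it, eee, me, ce) := s
  if b == "CSE" then (cse + 1, ece, it, eee, me, ce)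
  else if b == "ECE" then (cse, ece + 1, it, eee, me, ce)
  else if b == "IT" then (cse, ece, it + 1, eee, me, ce)
  else if b == "EEE" then (cse, ece, it, eee + 1, me, ce)
  else if b == "ME" then (cse, ece, it, eee, me + 1, ce)
  else if b == "CE" then (cse, ece, it, eee, me, ce + 1)
  else (cse, ece, it, eee, me, ce)

def count_branch (branch : List String) : List Int :=
  let st := branch.foldl pvStepA (0, 0, 0, 0, 0, 0)
  [st.1, st.2.1, st.2.2.1, st.2.2.2.1, st.2.2.2.2.1, st.2.2.2.2.2]

-- ===== PORT B =====
-- Port of B: one list.count scan per fixed category, mapped over the category list.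
def count_branch_alt (branch : List String) : List Int :=
  ["CSE", "ECE", "IT", "EEE", "ME", "CE"].map (fun k => (PySem.List.count branch k : Int))

-- ===== PRECONDITION & SPEC =====
def Spec_count_branch (branch : List String) (out : List Int) : Prop := out = count_branch_alt branch
instance (branch : List String) (out : List Int) : Decidable (Spec_count_branch branch out) := by unfold Spec_count_branch; infer_instance

-- ===== CLAIM (what is proved, stated in full; the proofs are below) =====
def Claim_equal_count_branch : Prop := ∀ (branch : List String), Dom_count_branch branch → Spec_count_branch branch (count_branch branch)

-- ===== LEMMAS AND PROOFS =====

-- A's fold starting at arbitrary accumulators adds each category's count.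
theorem count_branch_fold_eq (branch : List String) (a b c d e f : Int) :
    branch.foldl pvStepA (a, b, c, d, e, f)
    = (a + branch.count "CSE", b + branch.count "ECE", c + branch.count "IT",
       d + branch.count "EEE", e + branch.count "ME", f + branch.count "CE") := by
  induction branch generalizing a b c d e f with
  | nil => simp
  | cons hd tl ih =>
    rw [List.foldl_cons]
    have hstep : pvStepA (a, b, c, d, e, f) hd =
        (a + if hd = "CSE" then 1 else 0, b + if hd = "ECE" then 1 else 0,
         c + if hd = "IT" then 1 else 0, d + if hd = "EEE" then 1 else 0,
         e + if hd = "ME" then 1 else 0, f + if hd = "CE" then 1 else 0) := by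
      simp only [pvStepA, beq_iff_eq]
      split_ifs with h1 h2 h3 h4 h5 h6 <;> simp_all
    rw [hstep, ih]
    simp only [List.count_cons, Prod.mk.injEq, beq_iff_eq]
    refine ⟨?_, ?_, ?_, ?_, ?_, ?_⟩ <;> split_ifs <;> simp_all <;> omega

-- ===== VERDICT (by name: the statement is the Claim_ definition above) =====
theorem count_branch_spec : Claim_equal_count_branch := by
  intro branch _
  unfold Spec_count_branch count_branch count_branch_alt
  simp only [PySem.List.count_eq, List.map]
  have h := count_branch_fold_eq branch 0 0 0 0 0 0
  simp only [h]
  norm_num
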